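-- pv_equiv track=rewrite | github.com/HQkim/algorithm | programmers/월간코드챌린지시즌3_10월/2.py | solution
-- ===== SOURCE A (Python) =====
-- def solution(n, left, right):
--     left_row = (left+1) // n
--     right_row = (right+1) // n
--     left_res = (left+1) % n
--     right_res = (right+1) % n
--
--     if left_res:
--         left_row += 1
--     if right_res:
--         right_row += 1
--
--     arr = []
--     for i in range(left_row-1, right_row):
--         sub_arr = [0] * n
--         for j in range(n):
--             if j >= i:
--                 sub_arr[j] = j+1
--             else:
--                 sub_arr[j] = i+1
--         arr += sub_arr
--
--     answer = arr[left % n:left % n+(right-left)+1]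
--
--     return answer
-- ===== SOURCE B (Python) =====
-- def solution(n, left, right):
--     # closed form: the snail-fill matrix value at flat position p is max(row, col) + 1
--     return [max(p // n, p % n) + 1 for p in range(left, right + 1)]
-- ===== Notes on version B (the rewrite author's own statement) =====
-- stated objective: alternative
-- what changed: B computes each requested entry directly by the closed form max(p//n, p%n)+1 instead of materialising all matrix rows between left and right and slicing the concatenation (avoids the O(n) per-row work; a timing run could not confirm a consistent speed-up, so none is claimed).
-- outside the precondition, e.g. on solution(-3, 0, 5): A returns [], B returns [1, 0, 0, 1, -1, 0]
import Mathlib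
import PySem

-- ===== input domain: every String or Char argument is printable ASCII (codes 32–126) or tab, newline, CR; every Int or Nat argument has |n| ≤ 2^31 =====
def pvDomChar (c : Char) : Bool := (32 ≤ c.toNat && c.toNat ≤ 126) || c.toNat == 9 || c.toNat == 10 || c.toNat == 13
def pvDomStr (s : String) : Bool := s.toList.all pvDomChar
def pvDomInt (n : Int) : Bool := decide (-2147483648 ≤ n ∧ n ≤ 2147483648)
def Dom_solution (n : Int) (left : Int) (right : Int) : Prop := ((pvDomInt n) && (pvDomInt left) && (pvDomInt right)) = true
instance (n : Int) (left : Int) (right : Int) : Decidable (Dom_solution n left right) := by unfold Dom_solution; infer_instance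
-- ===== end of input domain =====

-- B replaces A's "build every matrix row between left and right, concatenate, slice" by the
-- closed form max(p//n, p%n)+1 evaluated per requested flat index p.

-- ===== PORT A =====
def solution (n : Int) (left : Int) (right : Int) : List Int :=
  let left_row := PySem.Int.floordiv (left + 1) n
  let right_row := PySem.Int.floordiv (right + 1) n
  let left_res := PySem.Int.mod (left + 1) n
  let right_res := PySem.Int.mod (right + 1) n
  let left_row := if left_res ≠ 0 then left_row + 1 else left_row
  let right_row := if right_res ≠ 0 then right_row + 1 else right_row
  let arr := (PySem.List.pyRange (left_row - 1) right_row).foldl (fun arr i =>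
    let sub_arr := PySem.List.pyRepeat [(0 : Int)] n
    let sub_arr := (PySem.List.pyRange 0 n).foldl (fun sub_arr j =>
      if j ≥ i then PySem.List.pySetD sub_arr j (j + 1)
      else PySem.List.pySetD sub_arr j (i + 1)) sub_arr
    arr ++ sub_arr) []
  PySem.List.slice arr (some (PySem.Int.mod left n))
    (some (PySem.Int.mod left n + (right - left) + 1))

-- ===== PORT B =====
def solution_alt (n : Int) (left : Int) (right : Int) : List Int :=
  (PySem.List.pyRange left (right + 1)).map
    (fun p => max (PySem.Int.floordiv p n) (PySem.Int.mod p n) + 1)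

-- ===== PRECONDITION & SPEC =====
-- Pre_ keeps the problem's natural domain n ≥ 1 (an n×n matrix): A raises ZeroDivisionError at
-- n = 0, and for n < 0 A's constant [] is only an artefact of `[0]*n` being the empty list.
def Pre_solution (n : Int) (left : Int) (right : Int) : Prop := 1 ≤ n
instance (n : Int) (left : Int) (right : Int) : Decidable (Pre_solution n left right) := by
  unfold Pre_solution; infer_instance

def pvWitness_solution : Int × Int × Int := (3, 2, 5)

def Spec_solution (n : Int) (left : Int) (right : Int) (out : List Int) : Prop :=
  out = solution_alt n left right
instance (n : Int) (left : Int) (right : Int) (out : List Int) : Decidable (Spec_solution n left right out) := by unfold Spec_solution; infer_instance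

-- ===== CLAIM (what is proved, stated in full; the proofs are below) =====
def Claim_equal_solution : Prop := ∀ (n : Int) (left : Int) (right : Int), Dom_solution n left right → Pre_solution n left right → Spec_solution n left right (solution n left right)

-- ===== LEMMAS AND PROOFS =====

-- `g n p` is B's per-index formula.
def pvG (n p : Int) : Int := max (PySem.Int.floordiv p n) (PySem.Int.mod p n) + 1

lemma pv_take_set_succ {α : Type} (init : List α) (k : Nat) (v : α) (h : k < init.length) :
    ((init.set k v).take (k + 1)) = init.take k ++ [v] := by
  induction init generalizing k with
  | nil => simp at h
  | cons x xs ih =>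
    cases k with
    | zero => simp
    | succ k => simpa using ih k (by simpa using h)

-- the inner `for j in range(n): sub_arr[j] = g j` loop fills positions a.toNat.. of `init`
lemma pv_foldl_set_pyRange (g : Int → Int) (b : Int) :
    ∀ (k : Nat) (a : Int) (init : List Int), (b - a).toNat = k → 0 ≤ a → init.length = b.toNat →
    (PySem.List.pyRange a b).foldl (fun l j => l.set j.toNat (g j)) init
      = init.take a.toNat ++ (PySem.List.pyRange a b).map g := by
  intro k
  induction k with
  | zero =>
    intro a init hk ha hlen
    rw [PySem.List.pyRange_one_eq_nil (by omega)]
    simp [List.take_of_length_le (by omega : init.length ≤ a.toNat)]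
  | succ k ih =>
    intro a init hk ha hlen
    have hab : a < b := by omega
    rw [PySem.List.pyRange_one_cons hab]
    simp only [List.foldl_cons, List.map_cons]
    rw [ih (a + 1) (init.set a.toNat (g a)) (by omega) (by omega) (by simpa using hlen)]
    have hlt : a.toNat < init.length := by omega
    have : (a + 1).toNat = a.toNat + 1 := by omega
    rw [this, pv_take_set_succ init a.toNat (g a) hlt]
    simp

-- one filled row equals B's formula on the corresponding block of flat indices
lemma pv_row_eq (n i : Int) (hn : 1 ≤ n) :
    (PySem.List.pyRange 0 n).map (fun j => if j ≥ i then j + 1 else i + 1)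
      = (PySem.List.pyRange (n * i) (n * i + n)).map (pvG n) := by
  apply List.ext_getElem
  · simp [PySem.List.length_pyRange_one]
  · intro k h1 h2
    simp only [List.getElem_map]
    rw [PySem.List.getElem_pyRange_one, PySem.List.getElem_pyRange_one]
    have hkn : (k : Int) < n := by
      have := h1; simp [PySem.List.length_pyRange_one] at this; omega
    have hdiv : PySem.Int.floordiv (n * i + k) n = i := by
      rw [PySem.Int.floordiv_eq_iff_of_pos (by omega)]
      constructor <;> nlinarith [Int.natCast_nonneg k]
    have hmod : PySem.Int.mod (n * i + k) n = (k : Int) := by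
      have h := PySem.Int.floordiv_mul_add_mod (n * i + (k : Int)) n
      rw [hdiv] at h; linarith [mul_comm i n]
    simp only [pvG, zero_add, hdiv, hmod]
    have := Int.natCast_nonneg k
    by_cases h : i ≤ (k : Int)
    · rw [if_pos (by omega), max_eq_right h]
    · rw [if_neg (by omega), max_eq_left (by omega)]

-- concatenating the rows for i ∈ [a, a+m) gives B's formula on flat indices [n*a, n*a+n*m)
lemma pv_flat (n : Int) (hn : 1 ≤ n) :
    ∀ (m : Nat) (a : Int),
    (PySem.List.pyRange a (a + m)).flatMap (fun i => (PySem.List.pyRange (n * i) (n * i + n)).map (pvG n))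
      = (PySem.List.pyRange (n * a) (n * a + n * m)).map (pvG n) := by
  intro m
  induction m with
  | zero =>
    intro a
    rw [PySem.List.pyRange_one_eq_nil (by simp), PySem.List.pyRange_one_eq_nil (by simp)]
    simp
  | succ m ih =>
    intro a
    have h1 : a < a + ((m : Int) + 1) := by omega
    have hc : (a : Int) + ((m : Nat) + 1 : Nat) = (a + 1) + (m : Int) := by push_cast; ring
    rw [hc, PySem.List.pyRange_one_cons (by omega), List.flatMap_cons, ih (a + 1)]
    have hnm : 0 ≤ n * (m : Int) := by positivity
    have hsplit : PySem.List.pyRange (n * a) (n * a + n * ((m : Nat) + 1 : Nat))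
        = PySem.List.pyRange (n * a) (n * a + n) ++ PySem.List.pyRange (n * a + n) (n * a + n * ((m : Nat) + 1 : Nat)) := by
      apply PySem.List.pyRange_one_append <;> (push_cast; nlinarith)
    rw [hsplit, List.map_append]
    congr 2 <;> (push_cast; ring_nf)

-- the ceiling adjustment in A: adjusted row of x equals x // n + 1
lemma pv_ceil (x n : Int) (hn : 1 ≤ n) :
    (if PySem.Int.mod (x + 1) n ≠ 0 then PySem.Int.floordiv (x + 1) n + 1
     else PySem.Int.floordiv (x + 1) n) = PySem.Int.floordiv x n + 1 := by
  have h1 := PySem.Int.floordiv_mul_add_mod (x + 1) n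
  have h2 := PySem.Int.floordiv_mul_add_mod x n
  have b1 := PySem.Int.mod_nonneg (x + 1) (by omega : (0:Int) < n)
  have b1' := PySem.Int.mod_lt (x + 1) (by omega : (0:Int) < n)
  have b2 := PySem.Int.mod_nonneg x (by omega : (0:Int) < n)
  have b2' := PySem.Int.mod_lt x (by omega : (0:Int) < n)
  set q1 := PySem.Int.floordiv (x + 1) n with hq1
  set q2 := PySem.Int.floordiv x n with hq2
  set m1 := PySem.Int.mod (x + 1) n with hm1d
  set m2 := PySem.Int.mod x n with hm2d
  have hd : (q1 - q2) * n = m2 + 1 - m1 := by linear_combination h1 - h2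
  split_ifs with h
  · have hm1 : 1 ≤ m1 := by omega
    have : q1 - q2 = 0 := by
      by_contra hne
      rcases lt_or_gt_of_ne hne with hlt | hgt
      · have hle : q1 - q2 ≤ -1 := by omega
        nlinarith
      · have hge : 1 ≤ q1 - q2 := by omega
        nlinarith
    omega
  · have hm10 : m1 = 0 := by omega
    have : q1 - q2 = 1 := by
      by_contra hne
      rcases lt_or_gt_of_ne hne with hlt | hgt
      · have h0 : q1 - q2 ≤ 0 := by omega
        nlinarith
      · have h2' : 2 ≤ q1 - q2 := by omega
        nlinarith
    omega

-- ===== VERDICT (by name: the statement is the Claim_ definition above) =====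
theorem solution_spec : Claim_equal_solution := by
  intro n left right _ hpre
  have hn : (1 : Int) ≤ n := hpre
  unfold Spec_solution solution solution_alt
  simp only []
  have hn0 : (0 : Int) < n := by omega
  rw [pv_ceil left n hn, pv_ceil right n hn]
  have hla := PySem.Int.floordiv_mul_add_mod left n
  have hra := PySem.Int.floordiv_mul_add_mod right n
  have hs0 := PySem.Int.mod_nonneg left hn0
  have hs1 := PySem.Int.mod_lt left hn0
  have hr0 := PySem.Int.mod_nonneg right hn0
  have hr1 := PySem.Int.mod_lt right hn0
  set a := PySem.Int.floordiv left n with ha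
  set b := PySem.Int.floordiv right n with hb
  set s := PySem.Int.mod left n with hs
  -- rewrite the double loop as a flatMap of rows, each in B-formula form
  have hrows :
      (PySem.List.pyRange (a + 1 - 1) (b + 1)).foldl (fun arr i =>
        arr ++ (PySem.List.pyRange 0 n).foldl (fun sub_arr j =>
          if j ≥ i then PySem.List.pySetD sub_arr j (j + 1)
          else PySem.List.pySetD sub_arr j (i + 1)) (PySem.List.pyRepeat [(0 : Int)] n)) []
      = (PySem.List.pyRange a (b + 1)).flatMap
          (fun i => (PySem.List.pyRange (n * i) (n * i + n)).map (pvG n)) := by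
    have hstep : ∀ i : Int,
        (PySem.List.pyRange 0 n).foldl (fun sub_arr j =>
          if j ≥ i then PySem.List.pySetD sub_arr j (j + 1)
          else PySem.List.pySetD sub_arr j (i + 1)) (PySem.List.pyRepeat [(0 : Int)] n)
        = (PySem.List.pyRange (n * i) (n * i + n)).map (pvG n) := by
      intro i
      have hcongr : (PySem.List.pyRange 0 n).foldl (fun sub_arr j =>
            if j ≥ i then PySem.List.pySetD sub_arr j (j + 1)
            else PySem.List.pySetD sub_arr j (i + 1)) (PySem.List.pyRepeat [(0 : Int)] n)
          = (PySem.List.pyRange 0 n).foldl (fun (l : List Int) j =>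
              l.set j.toNat (if j ≥ i then j + 1 else i + 1)) (PySem.List.pyRepeat [(0 : Int)] n) := by
        apply PySem.List.foldl_congr_mem
        intro acc x hx
        have hx' := (PySem.List.mem_pyRange_one).mp hx
        split_ifs with h
        · rw [PySem.List.pySetD_of_nonneg _ _ hx'.1]
        · rw [PySem.List.pySetD_of_nonneg _ _ hx'.1]
      rw [hcongr, PySem.List.pyRepeat_singleton,
        pv_foldl_set_pyRange (fun j => if j ≥ i then j + 1 else i + 1) n
          (n - 0).toNat 0 _ rfl le_rfl (by simp)]
      simpa using pv_row_eq n i hn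
    have : (a + 1 - 1) = a := by ring
    rw [this]
    have hcongr2 : (PySem.List.pyRange a (b + 1)).foldl (fun arr i =>
          arr ++ (PySem.List.pyRange 0 n).foldl (fun sub_arr j =>
            if j ≥ i then PySem.List.pySetD sub_arr j (j + 1)
            else PySem.List.pySetD sub_arr j (i + 1)) (PySem.List.pyRepeat [(0 : Int)] n)) []
        = (PySem.List.pyRange a (b + 1)).foldl (fun (arr : List Int) i =>
            arr ++ (PySem.List.pyRange (n * i) (n * i + n)).map (pvG n)) [] := by
      apply PySem.List.foldl_congr_mem
      intro acc x _
      rw [hstep x]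
    rw [hcongr2]
    simpa using PySem.List.foldl_append_eq_flatMap
      (fun i => (PySem.List.pyRange (n * i) (n * i + n)).map (pvG n)) (PySem.List.pyRange a (b + 1)) []
  rw [hrows]
  rcases lt_or_ge right left with hlr | hlr
  · -- empty result on both sides
    rw [PySem.List.pyRange_one_eq_nil (by omega : right + 1 ≤ left), List.map_nil]
    rcases lt_or_ge (s + (right - left) + 1) 0 with hneg | hpos
    · -- negative stop: the row range is already empty
      have hba : b < a := by
        have : right < a * n := by omega
        exact (PySem.Int.floordiv_lt_iff_lt_mul hn0).mpr this
      rw [PySem.List.pyRange_one_eq_nil (by omega : b + 1 ≤ a)]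
      simp [PySem.List.slice]
    · rw [PySem.List.slice_toNat _ hs0 hpos]
      have : (s + (right - left) + 1).toNat - s.toNat = 0 := by omega
      rw [this]
      simp
  · -- main case: left ≤ right
    have hab : a ≤ b := by
      rw [hb]
      exact (PySem.Int.le_floordiv_iff_mul_le hn0).mpr (by omega)
    have hc1 : n * a = a * n := mul_comm n a
    have hc2 : n * (b + 1) = b * n + n := by ring
    have hm : (a : Int) + ((b + 1 - a).toNat : Int) = b + 1 := by omega
    rw [← hm, pv_flat n hn (b + 1 - a).toNat a]
    have hB : n * a + n * ((b + 1 - a).toNat : Int) = n * (b + 1) := by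
      have : ((b + 1 - a).toNat : Int) = b + 1 - a := by omega
      rw [this]; ring
    rw [hB]
    have hstop : 0 ≤ s + (right - left) + 1 := by omega
    rw [PySem.List.slice_toNat _ hs0 hstop]
    have hsplit : PySem.List.pyRange (n * a) (n * (b + 1))
        = (PySem.List.pyRange (n * a) left ++ PySem.List.pyRange left (right + 1))
          ++ PySem.List.pyRange (right + 1) (n * (b + 1)) := by
      rw [← PySem.List.pyRange_one_append (n * a) left (right + 1) (by omega) (by omega),
        ← PySem.List.pyRange_one_append (n * a) (right + 1) (n * (b + 1)) (by omega) (by omega)]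
    rw [hsplit, List.map_append, List.map_append]
    rw [List.append_assoc]
    have hlen1 : ((PySem.List.pyRange (n * a) left).map (pvG n)).length = s.toNat := by
      simp [PySem.List.length_pyRange_one]; omega
    rw [← hlen1, List.drop_left]
    have hlen2 : ((PySem.List.pyRange left (right + 1)).map (pvG n)).length
        = (s + (right - left) + 1).toNat
          - ((PySem.List.pyRange (n * a) left).map (pvG n)).length := by
      simp [PySem.List.length_pyRange_one]; omega
    rw [← hlen2, List.take_left]
    rfl
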